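-- pv_equiv track=rewrite | github.com/abrahax1/College | 3rd Year/Python/Assignments/CA1/Q1.py | divide_doc
-- ===== SOURCE A (Python) =====
-- def divide_doc(new_doc, key_and_value):
--     i = 0
--     division_of_doc = {}
--
--     # loop to store the document on list to a dictionary
--     for lines1 in new_doc:
--         if lines1 == new_doc[0]:  # new_doc[0] is '<New Document>'
--             division_of_doc['Document {}'.format(i)] = key_and_value
--
--             key_and_value = ''
--             i += 1
--
--         else:
--             key_and_value += lines1
--
--     # adds the last lines1 to the dictionary
--     division_of_doc['Document {}'.format(i)] = key_and_value
--
--     # deletes document 0 which contains nothing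
--     del division_of_doc['Document {}'.format(0)]
--
--     return division_of_doc
-- ===== SOURCE B (Python) =====
-- def divide_doc(new_doc, key_and_value):
--     # key_and_value only ever becomes the deleted 'Document 0', so it never affects the output.
--     # Chunk-at-a-time: repeatedly search for the next delimiter with .index and slice the
--     # segment off, instead of A's line-at-a-time counter/accumulator state machine.
--     if not new_doc:
--         return {}
--     delim = new_doc[0]
--     rest = new_doc[1:]
--     out = {}
--     n = 1
--     while delim in rest:
--         j = rest.index(delim)
--         out['Document {}'.format(n)] = ''.join(rest[:j])
--         rest = rest[j + 1:]
--         n += 1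
--     out['Document {}'.format(n)] = ''.join(rest)
--     return out
-- ===== Notes on version B (the rewrite author's own statement) =====
-- stated objective: alternative
-- what changed: Replaces A's line-at-a-time counter+dict+delete-'Document 0' state machine by a chunk-at-a-time loop that repeatedly searches for the next delimiter with .index, joins the slice before it, and cuts it off, never creating the dummy 'Document 0' entry.
import Mathlib
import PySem

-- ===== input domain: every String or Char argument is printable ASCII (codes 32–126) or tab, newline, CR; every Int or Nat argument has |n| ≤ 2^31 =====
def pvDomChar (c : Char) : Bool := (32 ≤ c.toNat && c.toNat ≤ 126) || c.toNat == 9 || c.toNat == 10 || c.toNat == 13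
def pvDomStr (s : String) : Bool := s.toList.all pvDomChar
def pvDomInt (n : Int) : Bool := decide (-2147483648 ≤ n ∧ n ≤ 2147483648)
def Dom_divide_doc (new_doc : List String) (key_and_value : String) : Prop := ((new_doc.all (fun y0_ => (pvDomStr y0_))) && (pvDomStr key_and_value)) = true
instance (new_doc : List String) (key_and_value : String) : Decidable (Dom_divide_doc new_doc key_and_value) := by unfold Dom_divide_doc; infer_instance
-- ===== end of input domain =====

-- B replaces A's line-at-a-time counter/dict/delete-'Document 0' state machine by a
-- chunk-at-a-time loop: search the next delimiter with .index, join the slice before it,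
-- cut it off (alternative decomposition, same output).

-- ===== PORT A =====
def divide_doc (new_doc : List String) (key_and_value : String) : List (String × String) :=
  -- state = (i, division_of_doc, key_and_value)
  let st := new_doc.foldl
    (fun (s : Int × PySem.Dict String String × String) lines1 =>
      -- 'lines1 == new_doc[0]': the loop body only runs when new_doc ≠ [], so index 0 is in range
      -- and pyGetD is exact here
      if lines1 == PySem.List.pyGetD new_doc 0 "" then
        (s.1 + 1, (s.2.1.insert ("Document " ++ PySem.Int.toStr s.1) s.2.2, ""))
      else
        (s.1, (s.2.1, s.2.2 ++ lines1)))
    (0, (PySem.Dict.empty, key_and_value))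
  -- adds the last lines1 to the dictionary, then deletes 'Document 0' (always present, so 'del' never raises)
  let d := (st.2.1.insert ("Document " ++ PySem.Int.toStr st.1) st.2.2).erase ("Document " ++ PySem.Int.toStr 0)
  d.items

-- ===== PORT B =====
-- the while loop: '.index' is exact here (guarded by 'delim in rest'); rest strictly shrinks
def pvDocsLoop (delim : String) (rest : List String) (out : PySem.Dict String String) (n : Int) : PySem.Dict String String :=
  if hc : rest.contains delim then
    let j : Nat := (PySem.List.index? rest delim).getD 0
    pvDocsLoop delim (PySem.List.slice rest (some ((j : Int) + 1)) none)
      (out.insert ("Document " ++ PySem.Int.toStr n)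
        (PySem.Str.join "" (PySem.List.slice rest none (some (j : Int))))) (n + 1)
  else out.insert ("Document " ++ PySem.Int.toStr n) (PySem.Str.join "" rest)
termination_by rest.length
decreasing_by
  rw [show ((j : Int) + 1) = ((j + 1 : Nat) : Int) by push_cast; ring, PySem.List.slice_from_natCast]
  have hmem : delim ∈ rest := by simpa using hc
  have hne : rest ≠ [] := by rintro rfl; simp at hmem
  have : 0 < rest.length := List.length_pos_iff.mpr hne
  simp [List.length_drop]
  omega

def divide_doc_alt (new_doc : List String) (key_and_value : String) : List (String × String) :=
  match new_doc with
  | [] => []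
  | delim :: rest => (pvDocsLoop delim rest PySem.Dict.empty 1).items

-- ===== PRECONDITION & SPEC =====
def Spec_divide_doc (new_doc : List String) (key_and_value : String) (out : List (String × String)) : Prop := out = divide_doc_alt new_doc key_and_value
instance (new_doc : List String) (key_and_value : String) (out : List (String × String)) : Decidable (Spec_divide_doc new_doc key_and_value out) := by unfold Spec_divide_doc; infer_instance

-- ===== CLAIM (what is proved, stated in full; the proofs are below) =====
def Claim_equal_divide_doc : Prop := ∀ (new_doc : List String) (key_and_value : String), Dom_divide_doc new_doc key_and_value → Spec_divide_doc new_doc key_and_value (divide_doc new_doc key_and_value)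

-- ===== LEMMAS AND PROOFS =====

lemma dict_eq_of_items {κ ν : Type} [BEq κ] {d e : PySem.Dict κ ν} (h : d.items = e.items) : d = e := by
  cases d; cases e; simpa using h

lemma insert_fresh {κ ν : Type} [BEq κ] (d : PySem.Dict κ ν) (k : κ) (v : ν)
    (h : d.contains k = false) : d.insert k v = PySem.Dict.mk (d.items ++ [(k, v)]) :=
  dict_eq_of_items (PySem.Dict.items_insert_of_not_contains d v h)

lemma digitChar_val : ∀ m, m < 10 → (Nat.digitChar m).toNat - 48 = m := by decide

def pvDigVal (l : List Char) : Nat := l.foldl (fun a c => a * 10 + (c.toNat - 48)) 0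

lemma pvDigVal_toDigitsCore : ∀ (f n : Nat) (acc : List Char), n < 10 ^ f →
    (Nat.toDigitsCore 10 f n acc).foldl (fun a c => a * 10 + (c.toNat - 48)) 0
      = acc.foldl (fun a c => a * 10 + (c.toNat - 48)) n := by
  intro f
  induction f with
  | zero =>
    intro n acc h
    have hn : n = 0 := by omega
    subst hn
    rfl
  | succ f ih =>
    intro n acc h
    by_cases h0 : n / 10 = 0
    · have hn : n < 10 := by omega
      simp only [Nat.toDigitsCore, h0, if_pos, List.foldl_cons]
      rw [digitChar_val (n % 10) (by omega), Nat.mod_eq_of_lt hn]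
      norm_num
    · simp only [Nat.toDigitsCore, h0, ite_false]
      rw [ih (n / 10) _ (by
        have hp : (10 : Nat) ^ (f + 1) = 10 ^ f * 10 := by ring
        omega)]
      simp only [List.foldl_cons]
      rw [digitChar_val (n % 10) (by omega)]
      congr 1
      omega

lemma toDigits_val (n : Nat) : pvDigVal (Nat.toDigits 10 n) = n := by
  unfold pvDigVal Nat.toDigits
  rw [pvDigVal_toDigitsCore (n + 1) n []
    (lt_of_lt_of_le (Nat.lt_pow_self (by norm_num))
      (Nat.pow_le_pow_right (by norm_num) (Nat.le_succ n)))]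
  rfl

lemma toStrList_nat_inj {m k : Nat}
    (h : (PySem.Int.toStr (m : Int)).toList = (PySem.Int.toStr (k : Int)).toList) : m = k := by
  rw [PySem.Int.toList_toStr, PySem.Int.toList_toStr] at h
  simp only [PySem.Int.toChars, if_neg (by omega : ¬ ((m : Int) < 0)),
    if_neg (by omega : ¬ ((k : Int) < 0)), Int.toNat_natCast] at h
  have h2 := congrArg pvDigVal h
  rwa [toDigits_val, toDigits_val] at h2

lemma label_inj {m k : Nat}
    (h : ("Document " ++ PySem.Int.toStr (m : Int)) = ("Document " ++ PySem.Int.toStr (k : Int))) :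
    m = k := by
  have h2 := congrArg String.toList h
  rw [String.toList_append, String.toList_append] at h2
  exact toStrList_nat_inj (List.append_cancel_left h2)

-- the common shape: the segments of t (delimiter = delim), numbered from n, current text cur
def pvSegs (delim : String) : List String → Nat → String → List (String × String)
  | [], n, cur => [("Document " ++ PySem.Int.toStr (n : Int), cur)]
  | l :: ls, n, cur =>
    if l == delim then ("Document " ++ PySem.Int.toStr (n : Int), cur) :: pvSegs delim ls (n + 1) ""
    else pvSegs delim ls n (cur ++ l)

lemma pvSegs_keys (delim : String) : ∀ (t : List String) (n : Nat) (cur : String),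
    ∀ p ∈ pvSegs delim t n cur, ∃ m : Nat, n ≤ m ∧ p.1 = "Document " ++ PySem.Int.toStr (m : Int) := by
  intro t
  induction t with
  | nil =>
    intro n cur p hp
    simp only [pvSegs, List.mem_singleton] at hp
    exact ⟨n, le_refl n, by rw [hp]⟩
  | cons l ls ih =>
    intro n cur p hp
    by_cases hl : (l == delim) = true
    · rw [pvSegs, if_pos hl] at hp
      rcases List.mem_cons.mp hp with h1 | h1
      · exact ⟨n, le_refl n, by rw [h1]⟩
      · obtain ⟨m, hm, hpm⟩ := ih (n + 1) "" p h1
        exact ⟨m, by omega, hpm⟩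
    · rw [pvSegs, if_neg hl] at hp
      exact ih n (cur ++ l) p hp

lemma A_loop (delim : String) : ∀ (t : List String) (n : Nat) (pre : List (String × String)) (cur : String),
    (∀ m : Nat, n ≤ m → ∀ p ∈ pre, p.1 ≠ "Document " ++ PySem.Int.toStr (m : Int)) →
    ∀ st : Int × PySem.Dict String String × String,
    st = t.foldl
        (fun (s : Int × PySem.Dict String String × String) lines1 =>
          if lines1 == delim then
            (s.1 + 1, (s.2.1.insert ("Document " ++ PySem.Int.toStr s.1) s.2.2, ""))
          else
            (s.1, (s.2.1, s.2.2 ++ lines1)))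
        ((n : Int), (PySem.Dict.mk pre, cur)) →
    (st.2.1.insert ("Document " ++ PySem.Int.toStr st.1) st.2.2).items
      = pre ++ pvSegs delim t n cur := by
  intro t
  induction t with
  | nil =>
    intro n pre cur hfresh st hst
    rw [List.foldl_nil] at hst
    subst hst
    rw [PySem.Dict.items_insert_of_not_contains _ _ (by
      rw [PySem.Dict.contains_mk]
      simp only [List.any_eq_false]
      intro p hp
      simpa using hfresh n (le_refl n) p hp)]
    simp [pvSegs]
  | cons l ls ih =>
    intro n pre cur hfresh st hst
    by_cases hl : (l == delim) = true
    · rw [List.foldl_cons, if_pos hl] at hst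
      have hc : (PySem.Dict.mk pre).contains ("Document " ++ PySem.Int.toStr ((n : Nat) : Int)) = false := by
        rw [PySem.Dict.contains_mk]
        simp only [List.any_eq_false]
        intro p hp
        simpa using hfresh n (le_refl n) p hp
      rw [insert_fresh _ _ _ hc] at hst
      have hcast : ((n : Nat) : Int) + 1 = (((n + 1 : Nat)) : Int) := by push_cast; ring
      rw [hcast] at hst
      rw [ih (n + 1) (pre ++ [("Document " ++ PySem.Int.toStr ((n : Nat) : Int), cur)]) "" (by
        intro m hm p hp
        rcases List.mem_append.mp hp with h1 | h1
        · exact hfresh m (by omega) p h1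
        · simp only [List.mem_singleton] at h1
          rw [h1]
          intro hcontra
          have h3 := label_inj hcontra
          omega) st hst]
      rw [pvSegs, if_pos hl]
      simp [List.append_assoc]
    · rw [List.foldl_cons, if_neg hl] at hst
      rw [ih n pre (cur ++ l) hfresh st hst]
      rw [pvSegs, if_neg hl]

lemma chars_join_nil : ∀ (xs : List (List Char)), PySem.Chars.join [] xs = xs.flatten
  | [] => rfl
  | [a] => by simp [PySem.Chars.join, List.intercalate]
  | a :: b :: t => by
    have h := chars_join_nil (b :: t)
    simp only [PySem.Chars.join, List.intercalate] at h ⊢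
    rw [show List.intersperse ([] : List Char) (a :: b :: t) = a :: [] :: List.intersperse [] (b :: t) from rfl]
    simp only [List.flatten_cons] at h ⊢
    rw [h]
    simp

lemma join_cons (x : String) (xs : List String) :
    PySem.Str.join "" (x :: xs) = x ++ PySem.Str.join "" xs := by
  simp [PySem.Str.join, chars_join_nil]

lemma join_nil : PySem.Str.join "" ([] : List String) = "" := by decide

-- after the n-th delimiter, a delimiter-free prefix pre then a delimiter: one finished segment
lemma pvSegs_split (delim : String) : ∀ (pre : List String) (suf : List String) (n : Nat) (cur : String),
    delim ∉ pre →
    pvSegs delim (pre ++ delim :: suf) n cur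
      = ("Document " ++ PySem.Int.toStr (n : Int), cur ++ PySem.Str.join "" pre)
          :: pvSegs delim suf (n + 1) "" := by
  intro pre
  induction pre with
  | nil =>
    intro suf n cur _
    rw [List.nil_append, pvSegs, if_pos (beq_self_eq_true delim)]
    rw [join_nil]
    simp
  | cons p ps ih =>
    intro suf n cur hnp
    have hp : (p == delim) = false := by
      simp only [beq_eq_false_iff_ne, ne_eq]
      intro h; exact hnp (h ▸ List.mem_cons_self)
    rw [List.cons_append, pvSegs, if_neg (by simp [hp])]
    rw [ih suf n (cur ++ p) (fun h => hnp (List.mem_cons_of_mem _ h))]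
    rw [join_cons, ← String.append_assoc]

-- no delimiter left: one final segment
lemma pvSegs_no_delim (delim : String) : ∀ (t : List String) (n : Nat) (cur : String),
    delim ∉ t →
    pvSegs delim t n cur = [("Document " ++ PySem.Int.toStr (n : Int), cur ++ PySem.Str.join "" t)] := by
  intro t
  induction t with
  | nil => intro n cur _; rw [pvSegs, join_nil]; simp
  | cons l ls ih =>
    intro n cur hn
    have hl : (l == delim) = false := by
      simp only [beq_eq_false_iff_ne, ne_eq]
      intro h; exact hn (h ▸ List.mem_cons_self)
    rw [pvSegs, if_neg (by simp [hl])]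
    rw [ih n (cur ++ l) (fun h => hn (List.mem_cons_of_mem _ h))]
    rw [join_cons, ← String.append_assoc]

lemma not_contains_of_fresh (d : PySem.Dict String String) (k : String)
    (h : ∀ p ∈ d.items, p.1 ≠ k) : d.contains k = false := by
  cases hcc : d.contains k with
  | false => rfl
  | true =>
    exfalso
    have hk := (PySem.Dict.contains_iff_mem_keys d k).mp hcc
    have hne : d.get? k ≠ none := fun hn => ((PySem.Dict.get?_eq_none_iff_not_mem_keys d k).mp hn) hk
    obtain ⟨v, hv⟩ := Option.ne_none_iff_exists'.mp hne
    exact h _ (PySem.Dict.mem_items_of_get?_eq_some d hv) rfl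

lemma B_loop (delim : String) : ∀ (L : Nat) (rest : List String), rest.length = L →
    ∀ (out : PySem.Dict String String) (n : Nat),
    (∀ m : Nat, n ≤ m → ∀ p ∈ out.items, p.1 ≠ "Document " ++ PySem.Int.toStr (m : Int)) →
    (pvDocsLoop delim rest out (n : Int)).items = out.items ++ pvSegs delim rest n "" := by
  intro L
  induction L using Nat.strong_induction_on with
  | _ L ih =>
    intro rest hL out n hfresh
    by_cases hc : rest.contains delim = true
    · have hmem : delim ∈ rest := by simpa using hc
      obtain ⟨j, hj⟩ : ∃ j, PySem.List.index? rest delim = some j := by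
        exact Option.isSome_iff_exists.mp ((PySem.List.index?_isSome_iff rest delim).mpr hmem)
      obtain ⟨pre, suf, hdec, hlen, hpre⟩ := (PySem.List.index?_eq_some_iff rest delim j).mp hj
      rw [pvDocsLoop, dif_pos hc]
      simp only [hj, Option.getD_some]
      have htake : PySem.List.slice rest none (some (j : Int)) = pre := by
        rw [PySem.List.slice_to_natCast, hdec, ← hlen, List.take_left]
      have hdrop : PySem.List.slice rest (some ((j : Int) + 1)) none = suf := by
        rw [show ((j : Int) + 1) = ((j + 1 : Nat) : Int) by push_cast; ring,
          PySem.List.slice_from_natCast, hdec, ← hlen]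
        rw [show pre.length + 1 = (pre ++ [delim]).length by simp]
        rw [show pre ++ delim :: suf = (pre ++ [delim]) ++ suf by simp]
        exact List.drop_left
      rw [htake, hdrop]
      have hfresh' : ∀ m : Nat, n + 1 ≤ m →
          ∀ p ∈ (out.insert ("Document " ++ PySem.Int.toStr ((n : Nat) : Int))
              (PySem.Str.join "" pre)).items,
          p.1 ≠ "Document " ++ PySem.Int.toStr (m : Int) := by
        intro m hm p hp
        rw [PySem.Dict.items_insert_of_not_contains _ _ (not_contains_of_fresh out _ (fun p hp => hfresh n (le_refl n) p hp))] at hp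
        rcases List.mem_append.mp hp with h1 | h1
        · exact hfresh m (by omega) p h1
        · simp only [List.mem_singleton] at h1
          rw [h1]
          intro hcontra
          have := label_inj hcontra
          omega
      have hcast : ((n : Nat) : Int) + 1 = (((n + 1 : Nat)) : Int) := by push_cast; ring
      rw [hcast]
      rw [ih suf.length (by
            subst hL; rw [hdec]; simp; omega)
          suf rfl _ (n + 1) hfresh']
      rw [PySem.Dict.items_insert_of_not_contains _ _ (not_contains_of_fresh out _ (fun p hp => hfresh n (le_refl n) p hp))]
      rw [hdec, pvSegs_split delim pre suf n "" hpre]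
      simp [List.append_assoc]
    · have hnmem : delim ∉ rest := by simpa using hc
      rw [pvDocsLoop, dif_neg hc]
      rw [PySem.Dict.items_insert_of_not_contains _ _ (not_contains_of_fresh out _ (fun p hp => hfresh n (le_refl n) p hp))]
      rw [pvSegs_no_delim delim rest n "" hnmem]
      simp

lemma A_eq (h : String) (t : List String) (kv : String) :
    divide_doc (h :: t) kv = pvSegs h t 1 "" := by
  unfold divide_doc
  have hg : PySem.List.pyGetD (h :: t) 0 "" = h := by simp [pysem]
  simp only [hg, List.foldl_cons, beq_self_eq_true, if_true]
  rw [insert_fresh _ _ _ (PySem.Dict.contains_empty _)]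
  have HA := A_loop h t 1 [("Document " ++ PySem.Int.toStr (0 : Int), kv)] "" (by
    intro m hm p hp
    simp only [List.mem_singleton] at hp
    rw [hp]
    intro hcontra
    have h3 : (0 : Nat) = m := label_inj (by exact_mod_cast hcontra)
    omega)
  simp only [Nat.cast_one] at HA
  simp only [PySem.Dict.erase]
  rw [HA _ (by simp [PySem.Dict.empty])]
  rw [List.filter_append, List.filter_cons]
  simp only [beq_self_eq_true, Bool.not_true, List.filter_nil, Bool.false_eq_true, if_false]
  rw [List.nil_append, List.filter_eq_self.mpr (by
    intro p hp
    obtain ⟨m, hm, hpm⟩ := pvSegs_keys h t 1 "" p hp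
    simp only [Bool.not_eq_true', beq_eq_false_iff_ne, ne_eq]
    rw [hpm]
    intro hcontra
    have h3 : m = 0 := label_inj (by exact_mod_cast hcontra)
    omega)]

lemma B_eq (h : String) (t : List String) (kv : String) :
    divide_doc_alt (h :: t) kv = pvSegs h t 1 "" := by
  show (pvDocsLoop h t PySem.Dict.empty 1).items = pvSegs h t 1 ""
  have HB := B_loop h t.length t rfl PySem.Dict.empty 1 (by
    intro m hm p hp
    simp [PySem.Dict.empty] at hp)
  simp only [Nat.cast_one] at HB
  rw [HB]
  simp [PySem.Dict.empty]

-- ===== VERDICT (by name: the statement is the Claim_ definition above) =====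
theorem divide_doc_spec : Claim_equal_divide_doc := by
  intro new_doc kv _
  unfold Spec_divide_doc
  cases new_doc with
  | nil => simp [divide_doc, divide_doc_alt, PySem.Dict.empty, PySem.Dict.insert, PySem.Dict.erase, PySem.Dict.contains]
  | cons h t => rw [A_eq, B_eq]
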